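-- pv_equiv track=rewrite | github.com/RankingAI/tianchi | AntiFraud/feat.py | IsTheFirst
-- ===== SOURCE A (Python) =====
-- def IsTheFirst(tags):
--     n = len(tags)
--     result = []
--     for i in range(n):
--         if (i == 0):
--             result.append(1)
--         elif (tags[i] != tags[i - 1]):
--             result.append(1)
--         else:
--             result.append(0)
--     return result
-- ===== SOURCE B (Python) =====
-- def IsTheFirst(tags):
--     # Run-length traversal: walk run by run, emit 1 for the run head and
--     # zeros for the rest of the run, instead of comparing each index to i-1.
--     result = []
--     i, n = 0, len(tags)
--     while i < n:
--         j = i + 1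
--         while j < n and tags[j] == tags[i]:
--             j += 1
--         result.append(1)
--         result.extend([0] * (j - i - 1))
--         i = j
--     return result
-- ===== Notes on version B (the rewrite author's own statement) =====
-- stated objective: alternative
-- what changed: B traverses the list run-by-run (an outer loop over maximal runs of equal values, emitting one 1 and a block of zeros per run) instead of A's per-index comparison tags[i] != tags[i-1].
import Mathlib
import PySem

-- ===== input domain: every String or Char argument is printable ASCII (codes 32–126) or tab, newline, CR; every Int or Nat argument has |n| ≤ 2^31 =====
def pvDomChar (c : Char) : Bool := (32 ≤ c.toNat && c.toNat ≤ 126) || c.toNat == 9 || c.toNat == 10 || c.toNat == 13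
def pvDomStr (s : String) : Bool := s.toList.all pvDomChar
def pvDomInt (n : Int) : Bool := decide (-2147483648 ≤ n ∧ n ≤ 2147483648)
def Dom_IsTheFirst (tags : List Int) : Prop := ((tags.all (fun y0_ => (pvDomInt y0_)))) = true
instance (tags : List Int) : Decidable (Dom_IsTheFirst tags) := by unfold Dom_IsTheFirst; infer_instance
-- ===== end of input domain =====

-- B differs from A only in traversal strategy (run-by-run vs per-index); same return value.

-- ===== PORT A =====
-- every index i and i-1 used is in range, so pyGetD with default 0 is exact here
def IsTheFirst (tags : List Int) : List Int :=
  (PySem.List.pyRange 0 (tags.length : Int) 1).foldl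
    (fun result i =>
      if i == 0 then result ++ [1]
      else if PySem.List.pyGetD tags i 0 ≠ PySem.List.pyGetD tags (i - 1) 0 then result ++ [1]
      else result ++ [0])
    []

-- ===== PORT B =====
-- inner while: j advances over the run of elements equal to tags[i] (takeWhile/dropWhile);
-- each outer step emits [1] ++ (run length - 1) zeros and continues after the run.
def IsTheFirst_altGo : List Int → List Int
  | [] => []
  | x :: xs =>
      1 :: List.replicate (xs.takeWhile (· == x)).length 0 ++ IsTheFirst_altGo (xs.dropWhile (· == x))
termination_by l => l.length
decreasing_by
  simp only [List.length_cons]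
  exact Nat.lt_succ_of_le (List.length_dropWhile_le _ _)

def IsTheFirst_alt (tags : List Int) : List Int := IsTheFirst_altGo tags

-- ===== PRECONDITION & SPEC =====
def Spec_IsTheFirst (tags : List Int) (out : List Int) : Prop := out = IsTheFirst_alt tags
instance (tags : List Int) (out : List Int) : Decidable (Spec_IsTheFirst tags out) := by unfold Spec_IsTheFirst; infer_instance

-- ===== CLAIM (what is proved, stated in full; the proofs are below) =====
def Claim_equal_IsTheFirst : Prop := ∀ (tags : List Int), Dom_IsTheFirst tags → Spec_IsTheFirst tags (IsTheFirst tags)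

-- ===== LEMMAS AND PROOFS =====

-- common reference shape: head gets 1, each later position compares to its predecessor
def pvPairs : Int → List Int → List Int
  | _, [] => []
  | p, y :: ys => (if y ≠ p then 1 else 0) :: pvPairs y ys

def pvG : List Int → List Int
  | [] => []
  | x :: xs => 1 :: pvPairs x xs

lemma pvPairs_length (p : Int) (xs : List Int) : (pvPairs p xs).length = xs.length := by
  induction xs generalizing p with
  | nil => rfl
  | cons y ys ih => simp [pvPairs, ih]

lemma pvG_length (xs : List Int) : (pvG xs).length = xs.length := by
  cases xs with
  | nil => rfl
  | cons x xs => simp [pvG, pvPairs_length]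

lemma pvPairs_getElem (p : Int) (xs : List Int) (i : Nat) (h : i < xs.length) :
    (pvPairs p xs)[i]'(by rw [pvPairs_length]; exact h)
      = if xs[i] ≠ (if _ : i = 0 then p else xs[i-1]'(by omega)) then 1 else 0 := by
  induction xs generalizing p i with
  | nil => simp at h
  | cons y ys ih =>
    cases i with
    | zero => simp [pvPairs]
    | succ k =>
      simp only [pvPairs, List.getElem_cons_succ]
      rw [ih y k (by simpa using h)]
      cases k with
      | zero => simp
      | succ m => simp

-- B's side: altGo computes pvG
lemma pvPairs_run (x : Int) (xs : List Int) :
    pvPairs x xs = List.replicate (xs.takeWhile (· == x)).length 0 ++ pvG (xs.dropWhile (· == x)) := by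
  induction xs generalizing x with
  | nil => rfl
  | cons y ys ih =>
    by_cases hy : y = x
    · subst hy
      simp only [List.takeWhile, List.dropWhile, beq_self_eq_true, List.length_cons,
        List.replicate_succ, pvPairs]
      simp [ih y]
    · have hb : (y == x) = false := by simp [hy]
      simp [List.takeWhile, List.dropWhile, hb, pvPairs, pvG, hy]

lemma altGo_eq_pvG (xs : List Int) : IsTheFirst_altGo xs = pvG xs := by
  induction xs using IsTheFirst_altGo.induct with
  | case1 => simp [IsTheFirst_altGo, pvG]
  | case2 x xs ih =>
    rw [IsTheFirst_altGo, ih, pvG, pvPairs_run]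
    simp

-- A's side
lemma A_eq_map (tags : List Int) :
    IsTheFirst tags = (PySem.List.pyRange 0 (tags.length : Int) 1).map
      (fun i => if i == 0 then (1 : Int)
        else if PySem.List.pyGetD tags i 0 ≠ PySem.List.pyGetD tags (i - 1) 0 then 1 else 0) := by
  unfold IsTheFirst
  rw [show (fun (result : List Int) (i : Int) =>
      if i == 0 then result ++ [1]
      else if PySem.List.pyGetD tags i 0 ≠ PySem.List.pyGetD tags (i - 1) 0 then result ++ [1]
      else result ++ [0])
    = (fun (result : List Int) (i : Int) => result ++
        [if i == 0 then (1 : Int)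
         else if PySem.List.pyGetD tags i 0 ≠ PySem.List.pyGetD tags (i - 1) 0 then 1 else 0]) from by
      funext r i; split_ifs <;> rfl]
  rw [PySem.List.foldl_append_singleton_eq_map]
  simp

lemma A_eq_pvG (tags : List Int) : IsTheFirst tags = pvG tags := by
  rw [A_eq_map, PySem.List.pyRange_one]
  apply List.ext_getElem
  · simp [pvG_length]
  · intro i h1 h2
    have hn : i < tags.length := by simpa [pvG_length] using h2
    simp only [List.getElem_map, List.getElem_range]
    have hz : ((0 : Int) + (i : Int)) = (i : Int) := by omega
    rw [hz]
    cases tags with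
    | nil => simp at hn
    | cons x xs =>
      cases i with
      | zero => simp [pvG]
      | succ k =>
        have hk : k < xs.length := by simpa using hn
        have hne : ¬ (((k : Int) + 1) == 0) = true := by simp; omega
        simp only [Nat.cast_add, Nat.cast_one, pvG, List.getElem_cons_succ]
        rw [pvPairs_getElem x xs k hk]
        have e1 : PySem.List.pyGetD (x :: xs) ((k : Int) + 1) 0 = xs[k] := by
          have : ((k : Int) + 1) = ((k + 1 : Nat) : Int) := by push_cast; ring
          rw [this, PySem.List.pyGetD_natCast]
          simp [List.getD, hk]
        have e2 : PySem.List.pyGetD (x :: xs) ((k : Int) + 1 - 1) 0 = (x :: xs)[k]'(by simpa using Nat.lt_succ_of_lt hk) := by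
          have : ((k : Int) + 1 - 1) = ((k : Nat) : Int) := by omega
          rw [this, PySem.List.pyGetD_natCast]
          have hkc : k < (x :: xs).length := by simp; omega
          simp [List.getD, List.getElem?_eq_getElem hkc]
        rw [if_neg hne, e1, e2]
        cases k with
        | zero => simp
        | succ m =>
          have hm : m < xs.length := by omega
          simp only [Nat.succ_ne_zero, dite_false, List.getElem_cons_succ]
          congr 1

-- ===== VERDICT (by name: the statement is the Claim_ definition above) =====
theorem IsTheFirst_spec : Claim_equal_IsTheFirst := by
  intro tags _
  unfold Spec_IsTheFirst IsTheFirst_alt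
  rw [altGo_eq_pvG, A_eq_pvG]
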